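-- pv_equiv track=rewrite | github.com/LoliKonch/MOZI | Lab7/Prepare_No12.py | generateNumber
-- ===== SOURCE A (Python) =====
-- import math as m
--
-- def generateNumber(studentNumber):
--     number = (studentNumber + 110) * 23
--     numberList1 = []
--     numberList2 = []
--
--     for i in range(number - 20, number + 20):
--         for ii in range(2, int(m.sqrt(i)) - 1):
--             if i % ii == 0:
--                 break
--         else:
--             numberList1.append(i)
--
--     for i in range(number - 20, number + 20):
--         if i % 3 != 0 and i % 5 != 0 and i % 7 != 0 and not i in numberList1:
--             numberList2.append(i)
--
--     return numberList1[0], numberList1[1], numberList2[0], numberList2[1]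
-- ===== SOURCE B (Python) =====
-- import math as m
--
--
-- def _passes(i):
--     # same (buggy) divisor scan as the original: divisors 2 .. int(sqrt(i)) - 2
--     return all(i % d != 0 for d in range(2, int(m.sqrt(i)) - 1))
--
--
-- def generateNumber(studentNumber):
--     number = (studentNumber + 110) * 23
--     primes = []
--     others = []
--     for i in range(number - 20, number + 20):
--         if _passes(i):
--             primes.append(i)
--         elif i % 3 != 0 and i % 5 != 0 and i % 7 != 0:
--             others.append(i)
--         if len(primes) >= 2 and len(others) >= 2:
--             break
--     return primes[0], primes[1], others[0], others[1]
-- ===== Notes on version B (the rewrite author's own statement) =====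
-- stated objective: alternative
-- what changed: A's two sequential window passes (collect buggy-primes, then rescan the window testing membership in the first list) are fused into one scan that reuses the primality flag directly in an if/elif and breaks out early once both result lists hold two elements, returning the four values from the truncated lists.
import Mathlib
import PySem

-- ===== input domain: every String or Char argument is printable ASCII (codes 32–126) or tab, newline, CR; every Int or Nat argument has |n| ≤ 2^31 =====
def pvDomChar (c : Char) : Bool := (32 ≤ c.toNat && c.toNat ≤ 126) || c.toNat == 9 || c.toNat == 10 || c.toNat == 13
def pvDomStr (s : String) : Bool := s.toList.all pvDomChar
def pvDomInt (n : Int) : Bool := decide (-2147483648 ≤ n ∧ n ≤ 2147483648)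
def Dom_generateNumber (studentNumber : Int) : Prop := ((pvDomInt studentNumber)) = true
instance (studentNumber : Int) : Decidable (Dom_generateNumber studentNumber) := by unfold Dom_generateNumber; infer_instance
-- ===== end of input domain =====

-- B fuses A's two window passes into one early-exiting scan that reuses the primality flag
-- instead of the `i in numberList1` membership search (objective: alternative decomposition).

-- int(m.sqrt(i)) — exact for 0 ≤ i (on the window sizes Dom admits a correctly rounded double
-- sqrt truncates to the integer square root); Python raises ValueError for i < 0, excluded by Pre_.
-- (hand-rolled fuel-bounded integer sqrt: PySem has no sqrt primitive; kernel-transparent)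
def pvISqrtGo (n : Nat) : Nat → Nat → Nat
  | 0, k => k
  | fuel + 1, k => if (k + 1) * (k + 1) ≤ n then pvISqrtGo n fuel (k + 1) else k

def pvIntSqrt (i : Int) : Int := (pvISqrtGo i.toNat i.toNat 0 : Nat)

-- ===== PORT A =====
-- inner `for ii in range(...): if i % ii == 0: break / else:` — true iff the loop broke
def pvBroke (i : Int) : List Int → Bool
  | [] => false
  | d :: r => if PySem.Int.mod i d == 0 then true else pvBroke i r

def pvList1 (number : Int) : List Int :=
  (PySem.List.pyRange (number - 20) (number + 20) 1).foldl
    (fun acc i => if pvBroke i (PySem.List.pyRange 2 (pvIntSqrt i - 1) 1) then acc else acc ++ [i]) []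

def pvList2 (number : Int) : List Int :=
  (PySem.List.pyRange (number - 20) (number + 20) 1).foldl
    (fun acc i =>
      if PySem.Int.mod i 3 != 0 && PySem.Int.mod i 5 != 0 && PySem.Int.mod i 7 != 0
          && !((pvList1 number).contains i)
      then acc ++ [i] else acc) []

-- `.getD 0` marks the IndexError on a too-short list; those inputs are outside Pre_.
def generateNumber (studentNumber : Int) : Int × Int × Int × Int :=
  let number := (studentNumber + 110) * 23
  ((PySem.List.pyGet? (pvList1 number) 0).getD 0, (PySem.List.pyGet? (pvList1 number) 1).getD 0,
   (PySem.List.pyGet? (pvList2 number) 0).getD 0, (PySem.List.pyGet? (pvList2 number) 1).getD 0)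

-- ===== PORT B =====
-- all(i % d != 0 for d in range(2, int(m.sqrt(i)) - 1))
def pvPasses (i : Int) : Bool :=
  (PySem.List.pyRange 2 (pvIntSqrt i - 1) 1).all (fun d => PySem.Int.mod i d != 0)

-- the fused loop with its `break` once both lists hold two elements
def pvScan : List Int → List Int → List Int → List Int × List Int
  | [], primes, others => (primes, others)
  | i :: rest, primes, others =>
    let pq : List Int × List Int :=
      if pvPasses i then (primes ++ [i], others)
      else if PySem.Int.mod i 3 != 0 && PySem.Int.mod i 5 != 0 && PySem.Int.mod i 7 != 0 then
        (primes, others ++ [i])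
      else (primes, others)
    if 2 ≤ pq.1.length ∧ 2 ≤ pq.2.length then pq else pvScan rest pq.1 pq.2

def generateNumber_alt (studentNumber : Int) : Int × Int × Int × Int :=
  let number := (studentNumber + 110) * 23
  let pq := pvScan (PySem.List.pyRange (number - 20) (number + 20) 1) [] []
  ((PySem.List.pyGet? pq.1 0).getD 0, (PySem.List.pyGet? pq.1 1).getD 0,
   (PySem.List.pyGet? pq.2 0).getD 0, (PySem.List.pyGet? pq.2 1).getD 0)

-- ===== PRECONDITION & SPEC =====
-- Pre_ holds exactly where the Python A returns: the window must start at a nonnegative number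
-- (math.sqrt raises ValueError on a negative argument) and each of the two collected lists must
-- reach two elements (otherwise the final indexing raises IndexError).  The two counts are a
-- mathematical condition on the window ("at least two numbers with no divisor in [2, √i−2]",
-- resp. "at least two with such a divisor and coprime to 3,5,7"); the fuel-bounded pvISqrtGo
-- inside pvPasses exists only because Nat.sqrt is not kernel-computable — it is √i, not a re-run
-- of A's loop.
def Pre_generateNumber (studentNumber : Int) : Prop :=
  -109 ≤ studentNumber ∧
  2 ≤ (PySem.List.pyRange ((studentNumber + 110) * 23 - 20) ((studentNumber + 110) * 23 + 20) 1).countP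
        (fun i => pvPasses i) ∧
  2 ≤ (PySem.List.pyRange ((studentNumber + 110) * 23 - 20) ((studentNumber + 110) * 23 + 20) 1).countP
        (fun i => !pvPasses i && (PySem.Int.mod i 3 != 0 && PySem.Int.mod i 5 != 0 && PySem.Int.mod i 7 != 0))

instance (studentNumber : Int) : Decidable (Pre_generateNumber studentNumber) := by
  unfold Pre_generateNumber; infer_instance

def pvWitness_generateNumber : Int := -109

def Spec_generateNumber (studentNumber : Int) (out : Int × Int × Int × Int) : Prop := out = generateNumber_alt studentNumber
instance (studentNumber : Int) (out : Int × Int × Int × Int) : Decidable (Spec_generateNumber studentNumber out) := by unfold Spec_generateNumber; infer_instance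

-- ===== CLAIM (what is proved, stated in full; the proofs are below) =====
def Claim_equal_generateNumber : Prop := ∀ (studentNumber : Int), Dom_generateNumber studentNumber → Pre_generateNumber studentNumber → Spec_generateNumber studentNumber (generateNumber studentNumber)

-- ===== LEMMAS AND PROOFS =====

-- the "else-branch" membership of B's fused loop
def pvOth (i : Int) : Bool :=
  !pvPasses i && (PySem.Int.mod i 3 != 0 && PySem.Int.mod i 5 != 0 && PySem.Int.mod i 7 != 0)

lemma pvBroke_eq_not_all (i : Int) (l : List Int) :
    pvBroke i l = !l.all (fun d => PySem.Int.mod i d != 0) := by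
  induction l with
  | nil => rfl
  | cons d r ih =>
    cases h : (PySem.Int.mod i d == 0) with
    | true =>
      simp only [pvBroke, h, if_true, List.all_cons, bne, Bool.not_true, Bool.false_and,
        Bool.not_false]
    | false =>
      simp only [pvBroke, h, Bool.false_eq_true, if_false, ih, List.all_cons, bne,
        Bool.not_false, Bool.true_and]

lemma pvBroke_eq (i : Int) :
    pvBroke i (PySem.List.pyRange 2 (pvIntSqrt i - 1) 1) = !pvPasses i := by
  rw [pvBroke_eq_not_all, pvPasses]

lemma pvList1_eq (number : Int) :
    pvList1 number = (PySem.List.pyRange (number - 20) (number + 20) 1).filter pvPasses := by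
  unfold pvList1
  have hf : (fun (acc : List Int) (i : Int) =>
      if pvBroke i (PySem.List.pyRange 2 (pvIntSqrt i - 1) 1) then acc else acc ++ [i])
      = fun acc i => if pvPasses i then acc ++ [id i] else acc := by
    funext acc i
    rw [pvBroke_eq]
    cases pvPasses i <;> simp
  rw [hf, PySem.List.foldl_append_if pvPasses id, List.map_id]
  rfl

lemma pvList2_eq (number : Int) :
    pvList2 number = (PySem.List.pyRange (number - 20) (number + 20) 1).filter pvOth := by
  unfold pvList2
  have hid : (fun (acc : List Int) (i : Int) =>
      if PySem.Int.mod i 3 != 0 && PySem.Int.mod i 5 != 0 && PySem.Int.mod i 7 != 0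
          && !((pvList1 number).contains i)
      then acc ++ [i] else acc)
      = (fun (acc : List Int) (i : Int) =>
      if PySem.Int.mod i 3 != 0 && PySem.Int.mod i 5 != 0 && PySem.Int.mod i 7 != 0
          && !((pvList1 number).contains i)
      then acc ++ [id i] else acc) := rfl
  rw [hid, PySem.List.foldl_append_if
      (fun i => PySem.Int.mod i 3 != 0 && PySem.Int.mod i 5 != 0 && PySem.Int.mod i 7 != 0
        && !((pvList1 number).contains i)) id, List.map_id]
  refine (List.filter_congr ?_).symm.trans (List.nil_append _).symm
  intro i hi
  have hmem : (pvList1 number).contains i = pvPasses i := by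
    rw [pvList1_eq]
    cases hp : pvPasses i <;>
      simp [List.mem_filter, hi, hp]
  rw [hmem, pvOth]
  cases pvPasses i <;> cases PySem.Int.mod i 3 != 0 <;> cases PySem.Int.mod i 5 != 0 <;>
    cases PySem.Int.mod i 7 != 0 <;> rfl

lemma pvScan_spec (r : List Int) : ∀ (p q : List Int),
    (pvScan r p q).1 <+: p ++ r.filter pvPasses ∧
    (pvScan r p q).2 <+: q ++ r.filter pvOth ∧
    (pvScan r p q = (p ++ r.filter pvPasses, q ++ r.filter pvOth) ∨
      (2 ≤ (pvScan r p q).1.length ∧ 2 ≤ (pvScan r p q).2.length)) := by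
  induction r with
  | nil => intro p q; simp [pvScan]
  | cons i rest ih =>
    intro p q
    by_cases hp : pvPasses i
    · have hoth : pvOth i = false := by
        simp only [pvOth, hp, Bool.not_true, Bool.false_and]
      have hstep : p ++ (i :: rest).filter pvPasses = (p ++ [i]) ++ rest.filter pvPasses := by
        simp [List.filter_cons (p := pvPasses), hp]
      have hq : q ++ (i :: rest).filter pvOth = q ++ rest.filter pvOth := by
        simp [List.filter_cons (p := pvOth), hoth]
      simp only [pvScan, if_pos hp]
      split
      · rename_i hlen
        refine ⟨?_, ?_, Or.inr hlen⟩
        · rw [hstep]; exact List.prefix_append _ _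
        · rw [hq]; exact List.prefix_append _ _
      · rw [hstep, hq]; exact ih (p ++ [i]) q
    · have hp' : pvPasses i = false := by simpa using hp
      by_cases hm : (PySem.Int.mod i 3 != 0 && PySem.Int.mod i 5 != 0 && PySem.Int.mod i 7 != 0) = true
      · have hoth : pvOth i = true := by
          simp only [pvOth, hp', Bool.not_false, Bool.true_and]; exact hm
        have hstep : p ++ (i :: rest).filter pvPasses = p ++ rest.filter pvPasses := by
          simp [List.filter_cons (p := pvPasses), hp]
        have hq : q ++ (i :: rest).filter pvOth = (q ++ [i]) ++ rest.filter pvOth := by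
          simp [List.filter_cons (p := pvOth), hoth]
        simp only [pvScan, if_neg hp, if_pos hm]
        split
        · rename_i hlen
          refine ⟨?_, ?_, Or.inr hlen⟩
          · rw [hstep]; exact List.prefix_append _ _
          · rw [hq]; exact List.prefix_append _ _
        · rw [hstep, hq]; exact ih p (q ++ [i])
      · have hm' : (PySem.Int.mod i 3 != 0 && PySem.Int.mod i 5 != 0 && PySem.Int.mod i 7 != 0) = false := by
          simpa using hm
        have hoth : pvOth i = false := by
          simp only [pvOth, hp', Bool.not_false, Bool.true_and]; exact hm'

        have hstep : p ++ (i :: rest).filter pvPasses = p ++ rest.filter pvPasses := by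
          simp [List.filter_cons (p := pvPasses), hp]
        have hq : q ++ (i :: rest).filter pvOth = q ++ rest.filter pvOth := by
          simp [List.filter_cons (p := pvOth), hoth]
        simp only [pvScan, if_neg hp, if_neg hm]
        split
        · rename_i hlen
          refine ⟨?_, ?_, Or.inr hlen⟩
          · rw [hstep]; exact List.prefix_append _ _
          · rw [hq]; exact List.prefix_append _ _
        · rw [hstep, hq]; exact ih p q

lemma prefix_getD_eq {l₁ l₂ : List Int} (h : l₁ <+: l₂) {n : Nat} (hn : n < l₁.length) :
    (PySem.List.pyGet? l₂ (n : Int)).getD 0 = (PySem.List.pyGet? l₁ (n : Int)).getD 0 := by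
  rw [PySem.List.pyGet?_ofNat l₁ n hn, PySem.List.pyGet?_ofNat l₂ n (lt_of_lt_of_le hn h.length_le),
    h.getElem hn]
  rfl

lemma generateNumber_eq_alt (studentNumber : Int) :
    generateNumber studentNumber = generateNumber_alt studentNumber := by
  unfold generateNumber generateNumber_alt
  obtain ⟨h1, h2, h3 | ⟨hl1, hl2⟩⟩ :=
    pvScan_spec (PySem.List.pyRange ((studentNumber + 110) * 23 - 20) ((studentNumber + 110) * 23 + 20) 1) [] []
  · simp only [pvList1_eq, pvList2_eq, h3, List.nil_append]
  · simp only [List.nil_append] at h1 h2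
    have g10 := prefix_getD_eq h1 (n := 0) (by omega)
    have g11 := prefix_getD_eq h1 (n := 1) (by omega)
    have g20 := prefix_getD_eq h2 (n := 0) (by omega)
    have g21 := prefix_getD_eq h2 (n := 1) (by omega)
    norm_num at g10 g11 g20 g21
    simp only [pvList1_eq, pvList2_eq, g10, g11, g20, g21]

-- ===== VERDICT (by name: the statement is the Claim_ definition above) =====
theorem generateNumber_spec : Claim_equal_generateNumber := by
  intro studentNumber _ _
  unfold Spec_generateNumber
  exact generateNumber_eq_alt studentNumber
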